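-- pv_equiv track=rewrite | github.com/JAGAN62/python-29r | Day17/recursion.py | length_of_parameters
-- ===== SOURCE A (Python) =====
-- def length_of_parameters(string_list):
--     '''
--     this code snippet is common solution for
--     1. Given a list of words, return a dictionary where the keys are words and values are their lengths.
--     2. Given a string, return a dictionary where keys are characters and values are their occurrence.
--
--     '''
--     answer =  {}
--     for i in string_list:
--         for _ in i:
--             if i not in answer:
--                 answer[i]=0 #len(i)
--                 answer[i] += 1
--             elif i in answer:
--                  answer[i] += 1
--     return answer
-- ===== SOURCE B (Python) =====
-- def length_of_parameters(string_list):
--     freq = {}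
--     for w in string_list:
--         freq[w] = freq.get(w, 0) + 1
--     return {w: len(w) * c for w, c in freq.items() if w}
-- ===== Notes on version B (the rewrite author's own statement) =====
-- stated objective: faster
-- what changed: A's fused nested loop (one dict membership test and increment per character of every word) is replaced by building a word-frequency table in one pass over the list and then emitting len(word)*count in a single pass over the distinct words, skipping empty words.
import Mathlib
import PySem

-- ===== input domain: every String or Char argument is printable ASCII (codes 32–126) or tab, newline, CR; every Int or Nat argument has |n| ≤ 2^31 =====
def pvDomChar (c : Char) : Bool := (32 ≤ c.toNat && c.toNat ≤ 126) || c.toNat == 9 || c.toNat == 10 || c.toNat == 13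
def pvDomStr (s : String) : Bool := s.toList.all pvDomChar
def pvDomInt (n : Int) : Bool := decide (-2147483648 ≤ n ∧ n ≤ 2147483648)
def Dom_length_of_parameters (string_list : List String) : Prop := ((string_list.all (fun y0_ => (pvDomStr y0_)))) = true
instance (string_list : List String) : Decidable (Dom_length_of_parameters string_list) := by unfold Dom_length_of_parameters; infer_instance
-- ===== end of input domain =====

-- B replaces A's fused per-character count-and-sum loop by a word-frequency table built in one
-- pass, then one pass over the distinct words emitting len(word)*count (measured faster: fewer dict operations).

-- ===== PORT A =====
def length_of_parameters (string_list : List String) : List (String × Int) :=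
  (string_list.foldl (fun answer i =>
      i.toList.foldl (fun answer _ =>
        if answer.contains i = false then
          let a1 := answer.insert i 0
          a1.insert i (a1.getD i 0 + 1)
        else if answer.contains i = true then
          answer.insert i (answer.getD i 0 + 1)
        else answer) answer)
    PySem.Dict.empty).items

-- ===== PORT B =====
def length_of_parameters_alt (string_list : List String) : List (String × Int) :=
  ((string_list.foldl (fun d w => d.insert w (d.getD w 0 + 1))
      (PySem.Dict.empty : PySem.Dict String Int)).items.filter (fun p => !(p.1 == ""))).map (fun p => (p.1, PySem.Str.len p.1 * p.2))

-- ===== PRECONDITION & SPEC =====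
def Spec_length_of_parameters (string_list : List String) (out : List (String × Int)) : Prop := out = length_of_parameters_alt string_list
instance (string_list : List String) (out : List (String × Int)) : Decidable (Spec_length_of_parameters string_list out) := by unfold Spec_length_of_parameters; infer_instance

-- ===== CLAIM (what is proved, stated in full; the proofs are below) =====
def Claim_equal_length_of_parameters : Prop := ∀ (string_list : List String), Dom_length_of_parameters string_list → Spec_length_of_parameters string_list (length_of_parameters string_list)

-- ===== LEMMAS AND PROOFS =====

-- A's inner-loop body for word i (what one character iteration does to the dict)
def gStep (i : String) (d : PySem.Dict String Int) : PySem.Dict String Int :=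
  if d.contains i = false then
    let a1 := d.insert i 0
    a1.insert i (a1.getD i 0 + 1)
  else if d.contains i = true then
    d.insert i (d.getD i 0 + 1)
  else d

theorem a_unfold (xs : List String) :
    length_of_parameters xs =
      (xs.foldl (fun d i => i.toList.foldl (fun d _ => gStep i d) d) PySem.Dict.empty).items := rfl

theorem gStep_getD (i : String) (d : PySem.Dict String Int) (k : String) :
    (gStep i d).getD k 0 = if k = i then d.getD i 0 + 1 else d.getD k 0 := by
  by_cases hc : d.contains i = true
  · simp [gStep, hc, PySem.Dict.getD_insert]
  · simp only [gStep, Bool.not_eq_true] at *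
    simp [hc, PySem.Dict.getD_insert, PySem.Dict.getD_of_not_contains d (0:Int) hc]
    split <;> rfl

theorem gStep_keys (i : String) (d : PySem.Dict String Int) :
    (gStep i d).keys = if d.contains i then d.keys else d.keys ++ [i] := by
  by_cases hc : d.contains i = true
  · simp [gStep, hc, PySem.Dict.keys_insert_of_contains _ _ hc]
  · simp only [Bool.not_eq_true] at hc
    have h1 : (d.insert i 0).contains i = true := PySem.Dict.contains_insert_self d i 0
    simp [gStep, hc, PySem.Dict.keys_insert_of_contains _ _ h1,
      PySem.Dict.keys_insert_of_not_contains _ _ hc]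

theorem gStep_contains (i : String) (d : PySem.Dict String Int) :
    (gStep i d).contains i = true := by
  by_cases hc : d.contains i = true
  · simp [gStep, hc, PySem.Dict.contains_insert_self]
  · simp only [Bool.not_eq_true] at hc
    simp [gStep, hc, PySem.Dict.contains_insert_self]

theorem inner_getD (i : String) (l : List Char) (d : PySem.Dict String Int) (k : String) :
    (l.foldl (fun d _ => gStep i d) d).getD k 0 =
      if k = i then d.getD i 0 + l.length else d.getD k 0 := by
  induction l generalizing d with
  | nil => simp; intro h; rw [h]
  | cons c l ih =>
    simp only [List.foldl_cons, ih, gStep_getD, List.length_cons]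
    by_cases hk : k = i
    · simp [hk]; ring
    · simp [hk]

theorem inner_keys_of_contains (i : String) (l : List Char) (d : PySem.Dict String Int)
    (h : d.contains i = true) :
    (l.foldl (fun d _ => gStep i d) d).keys = d.keys := by
  induction l generalizing d with
  | nil => rfl
  | cons c l ih =>
    simp only [List.foldl_cons]
    rw [ih _ (gStep_contains i d), gStep_keys, if_pos h]

theorem inner_keys (i : String) (c : Char) (l : List Char) (d : PySem.Dict String Int) :
    ((c :: l).foldl (fun d _ => gStep i d) d).keys =
      if d.contains i then d.keys else d.keys ++ [i] := by
  simp only [List.foldl_cons]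
  rw [inner_keys_of_contains i l _ (gStep_contains i d), gStep_keys]

-- B's shape of the result, as a function of the distinct nonempty words
theorem a_getD (xs : List String) (k : String) :
    (xs.foldl (fun d i => i.toList.foldl (fun d _ => gStep i d) d) PySem.Dict.empty).getD k 0 =
      (k.toList.length : Int) * xs.count k := by
  induction xs using List.reverseRecOn with
  | nil => simp [PySem.Dict.getD_empty]
  | append_singleton xs w ih =>
    rw [List.foldl_concat, inner_getD, List.count_append]
    by_cases hk : k = w
    · subst hk; simp [ih]; ring
    · have h0 : List.count k [w] = 0 := by simp [Ne.symm hk]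
      simp [hk, ih, h0]

theorem ofList_filter {α : Type} [BEq α] [LawfulBEq α] (p : α → Bool) (xs : List α) :
    PySem.Set.ofList (xs.filter p) = (PySem.Set.ofList xs).filter p := by
  induction xs using List.reverseRecOn with
  | nil => rfl
  | append_singleton xs x ih =>
    rw [List.filter_append, PySem.Set.ofList_append_singleton]
    by_cases hp : p x = true
    · simp only [List.filter_cons, hp, if_pos, List.filter_nil,
        PySem.Set.ofList_append_singleton, ih]
      rw [PySem.Set.add_eq_ite, PySem.Set.add_eq_ite]
      by_cases hm : x ∈ (PySem.Set.ofList xs).filter p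
      · rw [if_pos hm, if_pos (List.mem_filter.mp hm).1]
      · rw [if_neg hm]
        by_cases hm2 : x ∈ PySem.Set.ofList xs
        · exact absurd (List.mem_filter.mpr ⟨hm2, hp⟩) hm
        · rw [if_neg hm2, List.filter_append]
          simp [hp]
    · rw [show List.filter p [x] = [] from by simp [hp], List.append_nil,
        PySem.Set.add_eq_ite, ih]
      by_cases hm2 : x ∈ PySem.Set.ofList xs
      · rw [if_pos hm2]
      · rw [if_neg hm2, List.filter_append,
          show List.filter p [x] = [] from by simp [hp], List.append_nil]

theorem a_keys (xs : List String) :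
    (xs.foldl (fun d i => i.toList.foldl (fun d _ => gStep i d) d) PySem.Dict.empty).keys =
      PySem.Set.ofList (xs.filter (fun w => !(w == ""))) := by
  induction xs using List.reverseRecOn with
  | nil => rfl
  | append_singleton xs w ih =>
    rw [List.foldl_concat, List.filter_append, PySem.Set.ofList_append]
    by_cases hw : w = ""
    · subst hw
      simp [PySem.Set.update, ih]
    · have hne : w.toList ≠ [] := by
        simpa using (String.toList_inj (s₁ := w) (s₂ := "")).ne.mpr hw
      obtain ⟨c, l, hcl⟩ := List.exists_cons_of_ne_nil hne
      rw [hcl, inner_keys, ih]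
      have hfilt : List.filter (fun w => !(w == "")) [w] = [w] := by simp [hw]
      rw [hfilt, PySem.Set.update_cons, PySem.Set.update_nil, PySem.Set.add_eq_ite]
      rw [PySem.Dict.contains_eq_decide_mem_keys, ih]
      by_cases hm : w ∈ PySem.Set.ofList (List.filter (fun w => !(w == "")) xs) <;>
        simp [hm]

theorem a_keys_nodup (xs : List String) :
    (xs.foldl (fun d i => i.toList.foldl (fun d _ => gStep i d) d) PySem.Dict.empty).keys.Nodup := by
  rw [a_keys]; exact PySem.Set.nodup_ofList _

theorem alt_eq (xs : List String) :
    length_of_parameters_alt xs =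
      ((PySem.Set.ofList xs).filter (fun w => !(w == ""))).map
        (fun k => (k, (k.toList.length : Int) * xs.count k)) := by
  unfold length_of_parameters_alt
  rw [PySem.Dict.foldl_insert_getD_add_one_eq_counter, PySem.Dict.items_counter,
    List.filter_map, List.map_map]
  simp [Function.comp_def, PySem.Str.len_eq]

-- ===== VERDICT (by name: the statement is the Claim_ definition above) =====
theorem length_of_parameters_spec : Claim_equal_length_of_parameters := by
  intro xs _
  show _ = _
  rw [a_unfold, alt_eq,
    PySem.Dict.items_eq_map_keys _ (a_keys_nodup xs) 0, a_keys, ofList_filter]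
  exact List.map_congr_left (fun k _ => by rw [a_getD])
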